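-- pv_equiv track=rewrite | github.com/kupl/Graphick | Heap_Abstracton/heap_merge_strategies.py | strategy_type_allocsite_keyword_exception2
-- ===== SOURCE A (Python) =====
-- def strategy_type_allocsite_keyword_exception2(obj_type_map, keywords, exception):
--     print ('Default: type, keywords: allocsite, keywords: {}, exceptions: {}'.format(len(keywords), exception))
--
--     keytype_rep_map = {}
--     rst = {}
--
--     _keywords = keywords.union(set([exception]))
--
--     for obj in obj_type_map.keys():
--         #if obj_type_map[obj] in keywords or obj in exceptions:
--         if obj_type_map[obj] in _keywords:
--             rst[obj] = obj
--         else: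
--             if obj_type_map[obj] not in keytype_rep_map.keys():
--                 keytype_rep_map[obj_type_map[obj]] = obj
--             rst[obj] = keytype_rep_map[obj_type_map[obj]]
--
--     return rst
-- ===== SOURCE B (Python) =====
-- def strategy_type_allocsite_keyword_exception2(obj_type_map, keywords, exception):
--     print ('Default: type, keywords: allocsite, keywords: {}, exceptions: {}'.format(len(keywords), exception))
--
--     _keywords = keywords.union(set([exception]))
--
--     items = list(obj_type_map.items())
--     return {obj: (obj if typ in _keywords
--                   else next(o for o, t in items if t == typ))
--             for obj, typ in items}
-- ===== Notes on version B (the rewrite author's own statement) =====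
-- stated objective: alternative
-- what changed: A threads a stateful type->representative dict through one pass, updating it lazily; B is stateless: a single comprehension that maps each object either to itself (type in keywords) or to the first object in the dict carrying the same type, found by a direct scan.
import Mathlib
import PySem

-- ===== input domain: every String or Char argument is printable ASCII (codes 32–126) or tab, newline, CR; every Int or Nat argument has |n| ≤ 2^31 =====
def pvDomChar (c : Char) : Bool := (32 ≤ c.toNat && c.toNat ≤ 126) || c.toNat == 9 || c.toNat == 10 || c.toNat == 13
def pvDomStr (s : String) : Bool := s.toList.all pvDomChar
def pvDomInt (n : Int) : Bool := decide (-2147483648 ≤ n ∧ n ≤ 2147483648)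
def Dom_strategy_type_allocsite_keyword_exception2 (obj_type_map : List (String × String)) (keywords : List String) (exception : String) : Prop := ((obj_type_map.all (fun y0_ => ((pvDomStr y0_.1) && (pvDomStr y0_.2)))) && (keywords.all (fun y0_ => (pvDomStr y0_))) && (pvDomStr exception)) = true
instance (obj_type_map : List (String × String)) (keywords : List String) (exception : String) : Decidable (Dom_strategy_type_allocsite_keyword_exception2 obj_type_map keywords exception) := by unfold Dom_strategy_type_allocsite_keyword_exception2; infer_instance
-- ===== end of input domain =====

-- ===== PORT A =====
-- Literal port of A. The Python dict argument is modelled by PySem.Dict.ofList; the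
-- loop folds (keytype_rep_map, rst) over the dict's keys; obj_type_map[obj] is the getD lookup.
-- A also prints a line; ports model the return value only.
def strategy_type_allocsite_keyword_exception2 (obj_type_map : List (String × String)) (keywords : List String) (exception : String) : List (String × String) :=
  let d := PySem.Dict.ofList obj_type_map
  let kw : PySem.Set String := PySem.Set.union (PySem.Set.ofList keywords) (PySem.Set.ofList [exception])
  let st := d.items.foldl
    (fun (st : PySem.Dict String String × PySem.Dict String String) p =>
      let t := d.getD p.1 ""   -- obj_type_map[obj]; obj is a key of d, so the default is never used
      if PySem.Set.contains kw t then (st.1, st.2.insert p.1 p.1)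
      else
        let krm := if st.1.contains t then st.1 else st.1.insert t p.1
        (krm, st.2.insert p.1 (krm.getD t "")))
    (PySem.Dict.empty, PySem.Dict.empty)
  st.2.items

-- ===== PORT B =====
-- Literal port of B: a stateless comprehension; each object maps to itself or to the first
-- object of the same type, found by a scan (next(...) = find?; it always succeeds since the
-- pair itself matches, so the "" default of the port is never used; the comprehension's keys
-- are the dict's keys, distinct, so its items are exactly this map).
def strategy_type_allocsite_keyword_exception2_alt (obj_type_map : List (String × String)) (keywords : List String) (exception : String) : List (String × String) :=
  let d := PySem.Dict.ofList obj_type_map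
  let kw : PySem.Set String := PySem.Set.union (PySem.Set.ofList keywords) (PySem.Set.ofList [exception])
  let items := d.items
  items.map (fun p =>
    (p.1, if PySem.Set.contains kw p.2 then p.1
          else ((items.find? (fun q => q.2 == p.2)).map (fun q => q.1)).getD ""))

-- ===== PRECONDITION & SPEC =====
def Spec_strategy_type_allocsite_keyword_exception2 (obj_type_map : List (String × String)) (keywords : List String) (exception : String) (out : List (String × String)) : Prop := out = strategy_type_allocsite_keyword_exception2_alt obj_type_map keywords exception
instance (obj_type_map : List (String × String)) (keywords : List String) (exception : String) (out : List (String × String)) : Decidable (Spec_strategy_type_allocsite_keyword_exception2 obj_type_map keywords exception out) := by unfold Spec_strategy_type_allocsite_keyword_exception2; infer_instance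

-- ===== CLAIM (what is proved, stated in full; the proofs are below) =====
def Claim_equal_strategy_type_allocsite_keyword_exception2 : Prop := ∀ (obj_type_map : List (String × String)) (keywords : List String) (exception : String), Dom_strategy_type_allocsite_keyword_exception2 obj_type_map keywords exception → Spec_strategy_type_allocsite_keyword_exception2 obj_type_map keywords exception (strategy_type_allocsite_keyword_exception2 obj_type_map keywords exception)

-- ===== LEMMAS AND PROOFS =====

-- the common per-pair result both ports compute
def pvRep (items : List (String × String)) (mem : String → Bool) (p : String × String) : String × String :=
  (p.1, if mem p.2 then p.1
        else ((items.find? (fun q => q.2 == p.2)).map (fun q => q.1)).getD "")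

lemma pvLoop_inv (items : List (String × String)) (mem : String → Bool)
    (hnd : (items.map (fun q => q.1)).Nodup) :
    ∀ (suf pre : List (String × String)) (krm : PySem.Dict String String),
    items = pre ++ suf →
    (∀ t, mem t = false →
      krm.get? t = (pre.find? (fun q => q.2 == t)).map (fun q => q.1)) →
    (suf.foldl
      (fun (st : PySem.Dict String String × PySem.Dict String String) p =>
        if mem p.2 then (st.1, st.2.insert p.1 p.1)
        else
          let krm' := if st.1.contains p.2 then st.1 else st.1.insert p.2 p.1
          (krm', st.2.insert p.1 (krm'.getD p.2 "")))
      (krm, PySem.Dict.mk (pre.map (pvRep items mem)))).2.items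
    = items.map (pvRep items mem) := by
  intro suf
  induction suf with
  | nil =>
    intro pre krm hitems _
    simp [hitems]
  | cons p suf ih =>
    intro pre krm hitems hkrm
    have hfst : (pre.map (pvRep items mem)).map (fun q => q.1) = pre.map (fun q => q.1) := by
      simp [pvRep]
    have hp1 : p.1 ∉ pre.map (fun q => q.1) := by
      have h := hnd
      rw [hitems] at h
      simp only [List.map_append, List.map_cons, List.nodup_append] at h
      intro hmem
      exact absurd rfl (h.2.2 p.1 hmem p.1 List.mem_cons_self)
    have hnc : (PySem.Dict.mk (pre.map (pvRep items mem))).contains p.1 = false := by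
      rw [Bool.eq_false_iff]
      intro hc
      apply hp1
      have h := (PySem.Dict.contains_iff_mem_keys (PySem.Dict.mk (pre.map (pvRep items mem))) p.1).mp hc
      simpa [PySem.Dict.keys, hfst] using h
    have hins : ∀ v, (PySem.Dict.mk (pre.map (pvRep items mem))).insert p.1 v
        = PySem.Dict.mk (pre.map (pvRep items mem) ++ [(p.1, v)]) := by
      intro v
      apply PySem.Dict.ext
      rw [PySem.Dict.items_insert_of_not_contains _ _ hnc]
    have hpre' : items = (pre ++ [p]) ++ suf := by simpa using hitems
    by_cases hm : mem p.2 = true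
    · -- keyword branch: rst[obj] = obj
      have hkrm' : ∀ t, mem t = false →
          krm.get? t = ((pre ++ [p]).find? (fun q => q.2 == t)).map (fun q => q.1) := by
        intro t ht
        have htne : p.2 ≠ t := by
          intro e; rw [e, ht] at hm; exact absurd hm (by simp)
        have hne : (p.2 == t) = false := beq_eq_false_iff_ne.mpr htne
        rw [List.find?_append]
        simp [List.find?, hne, hkrm t ht]
      have hrec := ih (pre ++ [p]) krm hpre' hkrm'
      rw [show List.map (pvRep items mem) (pre ++ [p])
            = List.map (pvRep items mem) pre ++ [(p.1, p.1)] from by simp [pvRep, hm]] at hrec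
      rw [← hrec]
      simp only [List.foldl_cons, hm, if_true, hins]
    · rw [Bool.not_eq_true] at hm
      by_cases hc : krm.contains p.2 = true
      · -- representative already recorded: rst[obj] = keytype_rep_map[type]
        obtain ⟨q, hq⟩ : ∃ q, pre.find? (fun q => q.2 == p.2) = some q := by
          have h1 := hkrm p.2 hm
          rw [PySem.Dict.contains_eq_isSome_get?, h1] at hc
          rcases h : pre.find? (fun q => q.2 == p.2) with _ | q
          · rw [h] at hc; simp at hc
          · exact ⟨q, h⟩
        have hfull : items.find? (fun q => q.2 == p.2) = some q := by
          rw [hitems, List.find?_append, hq]; rfl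
        have hkrm' : ∀ t, mem t = false →
            krm.get? t = ((pre ++ [p]).find? (fun q => q.2 == t)).map (fun q => q.1) := by
          intro t ht
          rw [List.find?_append]
          by_cases hte : t = p.2
          · subst hte; rw [hkrm _ ht, hq]; rfl
          · have hne : (p.2 == t) = false := beq_eq_false_iff_ne.mpr (Ne.symm hte)
            simp [List.find?, hne, hkrm t ht]
        have hrec := ih (pre ++ [p]) krm hpre' hkrm'
        rw [show List.map (pvRep items mem) (pre ++ [p])
              = List.map (pvRep items mem) pre ++ [(p.1, krm.getD p.2 "")] from by
            simp [pvRep, hm, hfull, PySem.Dict.getD_eq_get?_getD, hkrm p.2 hm, hq]] at hrec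
        rw [← hrec]
        simp only [List.foldl_cons, hm, Bool.false_eq_true, if_false, hc, if_true, hins]
      · -- fresh type: obj becomes the representative
        rw [Bool.not_eq_true] at hc
        have hprenone : pre.find? (fun q => q.2 == p.2) = none := by
          have h1 := hkrm p.2 hm
          rw [PySem.Dict.contains_eq_isSome_get?, h1] at hc
          rcases h : pre.find? (fun q => q.2 == p.2) with _ | q
          · exact h
          · rw [h] at hc; simp at hc
        have hfull : items.find? (fun q => q.2 == p.2) = some p := by
          rw [hitems, List.find?_append, hprenone]
          simp [List.find?]
        have hkrm' : ∀ t, mem t = false →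
            (krm.insert p.2 p.1).get? t = ((pre ++ [p]).find? (fun q => q.2 == t)).map (fun q => q.1) := by
          intro t ht
          rw [List.find?_append]
          by_cases hte : t = p.2
          · subst hte
            rw [PySem.Dict.get?_insert_self, hprenone]
            simp [List.find?]
          · have hne : (p.2 == t) = false := beq_eq_false_iff_ne.mpr (Ne.symm hte)
            rw [PySem.Dict.get?_insert_of_ne _ _ hte]
            simp [List.find?, hne, hkrm t ht]
        have hrec := ih (pre ++ [p]) (krm.insert p.2 p.1) hpre' hkrm'
        rw [show List.map (pvRep items mem) (pre ++ [p])
              = List.map (pvRep items mem) pre ++ [(p.1, (krm.insert p.2 p.1).getD p.2 "")] from by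
            simp [pvRep, hm, hfull, PySem.Dict.getD_insert_self]] at hrec
        rw [← hrec]
        simp only [List.foldl_cons, hm, Bool.false_eq_true, if_false, hc, hins]

theorem pvMain (obj_type_map : List (String × String)) (keywords : List String) (exception : String) :
    strategy_type_allocsite_keyword_exception2 obj_type_map keywords exception
    = strategy_type_allocsite_keyword_exception2_alt obj_type_map keywords exception := by
  simp only [strategy_type_allocsite_keyword_exception2, strategy_type_allocsite_keyword_exception2_alt]
  set d := PySem.Dict.ofList obj_type_map with hd
  set kw := PySem.Set.union (PySem.Set.ofList keywords) (PySem.Set.ofList [exception]) with hkw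
  have hnd : (d.items.map (fun q => q.1)).Nodup := by
    have h := PySem.Dict.nodup_keys_ofList obj_type_map
    simpa [PySem.Dict.keys, hd] using h
  -- obj_type_map[obj] looked up during the loop is the pair's own value
  have hstep : d.items.foldl
      (fun (st : PySem.Dict String String × PySem.Dict String String) p =>
        if PySem.Set.contains kw (d.getD p.1 "") then (st.1, st.2.insert p.1 p.1)
        else
          let krm := if st.1.contains (d.getD p.1 "") then st.1 else st.1.insert (d.getD p.1 "") p.1
          (krm, st.2.insert p.1 (krm.getD (d.getD p.1 "") "")))
      (PySem.Dict.empty, PySem.Dict.empty)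
      = d.items.foldl
      (fun (st : PySem.Dict String String × PySem.Dict String String) p =>
        if PySem.Set.contains kw p.2 then (st.1, st.2.insert p.1 p.1)
        else
          let krm := if st.1.contains p.2 then st.1 else st.1.insert p.2 p.1
          (krm, st.2.insert p.1 (krm.getD p.2 "")))
      (PySem.Dict.empty, PySem.Dict.empty) := by
    apply PySem.List.foldl_congr_mem
    intro acc x hx
    have hk : (d.items.map (fun q => q.1)).Nodup := hnd
    rw [PySem.Dict.getD_of_mem_items d (by exact hx) (by simpa [PySem.Dict.keys] using hk) ""]
  rw [hstep]
  have h0 : ∀ t, PySem.Set.contains kw t = false →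
      (PySem.Dict.empty : PySem.Dict String String).get? t
      = (([] : List (String × String)).find? (fun q => q.2 == t)).map (fun q => q.1) := by
    intro t _
    simp [PySem.Dict.get?_empty]
  have h := pvLoop_inv d.items (fun t => PySem.Set.contains kw t) hnd d.items [] PySem.Dict.empty
    (by simp) h0
  simp only [List.map_nil] at h
  rw [show (PySem.Dict.mk ([] : List (String × String))) = (PySem.Dict.empty : PySem.Dict String String) from rfl] at h
  rw [h]
  simp [pvRep]

-- ===== VERDICT (by name: the statement is the Claim_ definition above) =====
theorem strategy_type_allocsite_keyword_exception2_spec : Claim_equal_strategy_type_allocsite_keyword_exception2 := by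
  intro obj_type_map keywords exception _
  exact pvMain obj_type_map keywords exception
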